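-- pv_equiv track=rewrite | github.com/yashpandav/ZoningByLaw | app/chunks_pdf.py | get_full_hierarchy_path
-- ===== SOURCE A (Python) =====
-- def get_full_hierarchy_path(code, hierarchy_map):
--     """Get the full hierarchy path for a given code"""
--     if not code:
--         return ""
--
--     path_parts = []
--     current_code = code
--
--     while current_code:
--         if current_code in hierarchy_map:
--             path_parts.append(hierarchy_map[current_code]['title'])
--
--         if '.' in current_code:
--             current_code = '.'.join(current_code.split('.')[:-1])
--         else:
--             break
--
--     path_parts.reverse()
--     return " > ".join(path_parts)
-- ===== SOURCE B (Python) =====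
-- def get_full_hierarchy_path(code, hierarchy_map):
--     """Get the full hierarchy path for a given code"""
--     if not code:
--         return ""
--     parts = code.split('.')
--     path_parts = []
--     for i in range(1, len(parts) + 1):
--         prefix = '.'.join(parts[:i])
--         if prefix and prefix in hierarchy_map:
--             path_parts.append(hierarchy_map[prefix]['title'])
--     return " > ".join(path_parts)
-- ===== Notes on version B (the rewrite author's own statement) =====
-- stated objective: simpler
-- what changed: Replaces the descending trim-last-component-and-reverse while loop with a single split followed by a forward shortest-to-longest prefix scan, so no list reversal and no repeated split/join trimming of the current code is needed.
import Mathlib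
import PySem

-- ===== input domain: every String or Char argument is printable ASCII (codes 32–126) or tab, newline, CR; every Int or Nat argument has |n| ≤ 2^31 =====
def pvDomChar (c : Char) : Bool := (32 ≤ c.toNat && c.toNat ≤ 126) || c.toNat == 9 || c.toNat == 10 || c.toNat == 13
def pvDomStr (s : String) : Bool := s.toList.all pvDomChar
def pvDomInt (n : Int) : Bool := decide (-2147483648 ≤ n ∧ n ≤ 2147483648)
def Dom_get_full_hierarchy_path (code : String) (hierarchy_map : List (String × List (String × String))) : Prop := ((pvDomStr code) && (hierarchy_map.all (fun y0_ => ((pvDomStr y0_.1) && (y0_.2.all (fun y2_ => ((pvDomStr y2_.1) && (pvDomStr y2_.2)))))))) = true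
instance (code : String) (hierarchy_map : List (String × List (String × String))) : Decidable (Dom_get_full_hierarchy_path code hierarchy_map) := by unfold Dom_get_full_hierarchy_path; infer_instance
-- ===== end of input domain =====

-- B replaces A's descending trim-and-reverse while loop by one split followed by a forward
-- shortest-to-longest prefix scan (objective: simpler — no reverse, no repeated trim/split/join).

-- ===== PORT A =====
-- proof-side model of PySem.Chars.splitOn by '.', needed only to justify the
-- termination of A's while loop (pvTrimDot_lt below, cited by pvLoopA)
def pvSplitDot (pre : List Char) : List Char → List (List Char)
  | [] => [pre]
  | x :: rest => if x = '.' then pre :: pvSplitDot [] rest else pvSplitDot (pre ++ [x]) rest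

theorem pv_go_spec (fuel : Nat) : ∀ (l cur : List Char) (acc : List (List Char)),
    l.length < fuel →
    PySem.Chars.splitOn.go ['.'] fuel l cur acc = acc.reverse ++ pvSplitDot cur.reverse l := by
  induction fuel with
  | zero => intro l cur acc h; omega
  | succ f ih =>
    intro l cur acc h
    cases l with
    | nil => simp [PySem.Chars.splitOn.go, pvSplitDot]
    | cons x rest =>
      simp only [PySem.Chars.splitOn.go]
      by_cases hx : x = '.'
      · subst hx
        simp only [List.isPrefixOf, BEq.rfl, Bool.true_and, if_true, List.length_singleton,
          List.drop_succ_cons, List.drop_zero]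
        rw [ih rest [] (cur.reverse :: acc) (by simpa using Nat.lt_of_succ_lt_succ h)]
        simp [pvSplitDot]
      · have : (['.'].isPrefixOf (x :: rest)) = false := by
          simp [List.isPrefixOf]; intro hc; exact absurd hc.symm hx
        rw [this]
        simp only [Bool.false_eq_true, if_false]
        rw [ih rest (x :: cur) acc (by simpa using Nat.lt_of_succ_lt_succ h)]
        simp [pvSplitDot, hx]

theorem pv_splitOn_eq (l : List Char) : PySem.Chars.splitOn l ['.'] = pvSplitDot [] l := by
  have := pv_go_spec (l.length + 1) l [] [] (by omega)
  simpa [PySem.Chars.splitOn] using this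

theorem pvSplitDot_ne_nil (pre l) : pvSplitDot pre l ≠ [] := by
  induction l generalizing pre with
  | nil => simp [pvSplitDot]
  | cons x rest ih => by_cases hx : x = '.' <;> simp [pvSplitDot, hx, ih]

theorem pv_join_cons (a : List Char) (ps : List (List Char)) (h : ps ≠ []) :
    PySem.Chars.join ['.'] (a :: ps) = a ++ '.' :: PySem.Chars.join ['.'] ps := by
  cases ps with
  | nil => exact absurd rfl h
  | cons b t => simp [PySem.Chars.join, List.intercalate, List.intersperse]

theorem pv_join_pvSplitDot (l : List Char) : ∀ pre, PySem.Chars.join ['.'] (pvSplitDot pre l) = pre ++ l := by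
  induction l with
  | nil => intro pre; simp [pvSplitDot, PySem.Chars.join, List.intercalate]
  | cons x rest ih =>
    intro pre
    by_cases hx : x = '.'
    · subst hx
      rw [pvSplitDot, if_pos rfl, pv_join_cons _ _ (pvSplitDot_ne_nil _ _), ih]
      simp
    · rw [pvSplitDot, if_neg hx, ih]
      simp

theorem pv_len2 (l : List Char) (h : '.' ∈ l) : ∀ pre, 2 ≤ (pvSplitDot pre l).length := by
  induction l with
  | nil => simp at h
  | cons x rest ih =>
    intro pre
    by_cases hx : x = '.'
    · subst hx
      rw [pvSplitDot, if_pos rfl]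
      simp only [List.length_cons]
      have : 1 ≤ (pvSplitDot [] rest).length := List.length_pos_of_ne_nil (pvSplitDot_ne_nil _ _)
      omega
    · have hr : '.' ∈ rest := by rcases List.mem_cons.mp h with h' | h'; exact absurd h'.symm hx; exact h'
      rw [pvSplitDot, if_neg hx]; exact ih hr _

theorem pv_mem_of_isIn (cur : List Char) (h : PySem.Chars.isIn ['.'] cur = true) : '.' ∈ cur := by
  have := (PySem.Chars.isIn_iff_infix ['.'] cur).mp h
  exact this.subset (by simp)

theorem pv_join_concat (ps : List (List Char)) (last : List Char) (h : ps ≠ []) :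
    PySem.Chars.join ['.'] (ps ++ [last]) = PySem.Chars.join ['.'] ps ++ '.' :: last := by
  induction ps with
  | nil => exact absurd rfl h
  | cons a t ih =>
    cases t with
    | nil => simp [PySem.Chars.join, List.intercalate, List.intersperse]
    | cons b u =>
      rw [List.cons_append, pv_join_cons a _ (by simp), pv_join_cons a _ (by simp), ih (by simp)]
      simp

-- '.'.join(current_code.split('.')[:-1])  (the trimming step of A's while loop)
def pvTrimDot (current : List Char) : List Char :=
  PySem.Chars.join ['.'] ((PySem.Chars.splitOn current ['.']).dropLast)

-- termination fact for A's while loop: trimming a code that contains '.' strictly shortens it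
theorem pvTrimDot_lt (current : List Char) (h : PySem.Chars.isIn ['.'] current = true) :
    (pvTrimDot current).length < current.length := by
  have hmem : '.' ∈ current := pv_mem_of_isIn current h
  have hsplit := pv_splitOn_eq current
  have h2 : 2 ≤ (pvSplitDot [] current).length := pv_len2 current hmem []
  have hne : (pvSplitDot [] current).dropLast ≠ [] := by
    intro hc
    have := congrArg List.length hc
    simp [List.length_dropLast] at this
    omega
  have hdecomp : pvSplitDot [] current
      = (pvSplitDot [] current).dropLast ++ [(pvSplitDot [] current).getLast (pvSplitDot_ne_nil _ _)] :=
    (List.dropLast_append_getLast _).symm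
  have hjoin : current = PySem.Chars.join ['.'] (pvSplitDot [] current) := (pv_join_pvSplitDot current []).symm
  rw [pvTrimDot, hsplit]
  conv_rhs => rw [hjoin, hdecomp]
  rw [pv_join_concat _ _ hne]
  simp

-- A's while loop; appends titles longest-prefix first (the caller reverses afterwards)
def pvLoopA (hm : List (String × List (String × String))) (current : List Char)
    (path_parts : List String) : List String :=
  if current = [] then path_parts
  else
    -- 'if current_code in hierarchy_map: path_parts.append(hierarchy_map[current_code]["title"])'
    -- (membership test + index fused into one lookup; missing 'title' = KeyError, outside Pre_)
    let acc' := match (PySem.Dict.mk hm).get? (String.ofList current) with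
      | some entry =>
        match (PySem.Dict.mk entry).get? "title" with
        | some t => path_parts ++ [t]
        | none => path_parts
      | none => path_parts
    if hdot : PySem.Chars.isIn ['.'] current = true then
      pvLoopA hm (pvTrimDot current) acc'
    else acc'
termination_by current.length
decreasing_by exact pvTrimDot_lt current hdot

def get_full_hierarchy_path (code : String) (hierarchy_map : List (String × List (String × String))) : String :=
  if code = "" then ""
  else PySem.Str.join " > " ((pvLoopA hierarchy_map code.toList []).reverse)

-- ===== PORT B =====
def get_full_hierarchy_path_alt (code : String) (hierarchy_map : List (String × List (String × String))) : String :=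
  if code = "" then ""
  else
    let parts := PySem.Chars.splitOn code.toList ['.']
    -- for i in range(1, len(parts)+1): prefix = '.'.join(parts[:i]); …
    let path_parts := (List.range parts.length).foldl (fun acc i =>
      let pref := PySem.Chars.join ['.'] (parts.take (i + 1))
      if pref ≠ [] then
        match (PySem.Dict.mk hierarchy_map).get? (String.ofList pref) with
        | some entry =>
          match (PySem.Dict.mk entry).get? "title" with
          | some t => acc ++ [t]
          | none => acc
        | none => acc
      else acc) []
    PySem.Str.join " > " path_parts

-- ===== PRECONDITION & SPEC =====
-- Pre_ excludes exactly the inputs on which A raises KeyError: some non-empty dotted prefix of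
-- code is a key of hierarchy_map whose entry has no 'title' key.
def Pre_get_full_hierarchy_path (code : String) (hierarchy_map : List (String × List (String × String))) : Prop :=
  ((List.range (PySem.Chars.splitOn code.toList ['.']).length).all (fun i =>
    let pref := PySem.Chars.join ['.'] ((PySem.Chars.splitOn code.toList ['.']).take (i + 1))
    if pref = [] then true
    else match (PySem.Dict.mk hierarchy_map).get? (String.ofList pref) with
      | some entry => (PySem.Dict.mk entry).contains "title"
      | none => true)) = true
instance (code : String) (hierarchy_map : List (String × List (String × String))) : Decidable (Pre_get_full_hierarchy_path code hierarchy_map) := by unfold Pre_get_full_hierarchy_path; infer_instance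

def pvWitness_get_full_hierarchy_path : String × (List (String × List (String × String))) :=
  ("a.b", [("a", [("title", "A")]), ("a.b", [("title", "AB")])])

def Spec_get_full_hierarchy_path (code : String) (hierarchy_map : List (String × List (String × String))) (out : String) : Prop := out = get_full_hierarchy_path_alt code hierarchy_map
instance (code : String) (hierarchy_map : List (String × List (String × String))) (out : String) : Decidable (Spec_get_full_hierarchy_path code hierarchy_map out) := by unfold Spec_get_full_hierarchy_path; infer_instance

-- ===== CLAIM (what is proved, stated in full; the proofs are below) =====
def Claim_equal_get_full_hierarchy_path : Prop := ∀ (code : String) (hierarchy_map : List (String × List (String × String))), Dom_get_full_hierarchy_path code hierarchy_map → Pre_get_full_hierarchy_path code hierarchy_map → Spec_get_full_hierarchy_path code hierarchy_map (get_full_hierarchy_path code hierarchy_map)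

-- ===== LEMMAS AND PROOFS =====

theorem pv_no_dot_mem (l : List Char) : ∀ pre, ('.' ∉ pre) → ∀ p ∈ pvSplitDot pre l, '.' ∉ p := by
  induction l with
  | nil => intro pre hpre p hp; simp [pvSplitDot] at hp; subst hp; exact hpre
  | cons x rest ih =>
    intro pre hpre p hp
    by_cases hx : x = '.'
    · subst hx
      rw [pvSplitDot, if_pos rfl] at hp
      rcases List.mem_cons.mp hp with h | h
      · subst h; exact hpre
      · exact ih [] (by simp) p h
    · rw [pvSplitDot, if_neg hx] at hp
      exact ih (pre ++ [x]) (by simp [hpre]; exact fun h => hx h.symm) p hp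

theorem pvSplitDot_append (q : List Char) (hq : '.' ∉ q) : ∀ pre l, pvSplitDot pre (q ++ l) = pvSplitDot (pre ++ q) l := by
  induction q with
  | nil => simp
  | cons x t ih =>
    intro pre l
    have hx : x ≠ '.' := fun h => hq (h ▸ List.mem_cons_self ..)
    rw [List.cons_append, pvSplitDot, if_neg hx, ih (fun h => hq (List.mem_cons_of_mem _ h))]
    simp

theorem pv_recover (qs : List (List Char)) : ∀ q pre, '.' ∉ q → (∀ p ∈ qs, '.' ∉ p) →
    pvSplitDot pre (PySem.Chars.join ['.'] (q :: qs)) = (pre ++ q) :: qs := by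
  induction qs with
  | nil =>
    intro q pre hq _
    rw [show PySem.Chars.join ['.'] [q] = q by simp [PySem.Chars.join, List.intercalate]]
    rw [show q = q ++ [] by simp, pvSplitDot_append q hq pre []]
    simp [pvSplitDot]
  | cons q' t ih =>
    intro q pre hq hqs
    rw [pv_join_cons q _ (by simp)]
    rw [pvSplitDot_append q hq]
    rw [pvSplitDot, if_pos rfl]
    rw [ih q' [] (hqs q' (by simp)) (fun p hp => hqs p (by simp [hp]))]
    simp

theorem pv_isIn_of_mem (cur : List Char) (h : '.' ∈ cur) : PySem.Chars.isIn ['.'] cur = true := by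
  apply (PySem.Chars.isIn_iff_infix ['.'] cur).mpr
  obtain ⟨s, t, rfl⟩ := List.append_of_mem h
  exact ⟨s, t, by simp⟩

theorem pv_join_singleton' (a : List Char) : PySem.Chars.join ['.'] [a] = a := by
  simp [PySem.Chars.join, List.intercalate, List.intersperse]

-- the contribution of one prefix lookup (shared characterisation of both loops' bodies)
def pvOpt (hm : List (String × List (String × String))) (pref : List Char) : List String :=
  if pref = [] then []
  else match (PySem.Dict.mk hm).get? (String.ofList pref) with
    | some entry =>
      match (PySem.Dict.mk entry).get? "title" with
      | some t => [t]
      | none => []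
    | none => []

-- the forward (shortest-to-longest) list of titles for prefixes 1..n
def pvF (hm : List (String × List (String × String))) (parts : List (List Char)) : Nat → List String
  | 0 => []
  | n + 1 => pvF hm parts n ++ pvOpt hm (PySem.Chars.join ['.'] (parts.take (n + 1)))

theorem pvOpt_len (hm pref) : (pvOpt hm pref).reverse = pvOpt hm pref := by
  unfold pvOpt
  split
  · rfl
  · cases (PySem.Dict.mk hm).get? (String.ofList pref) with
    | none => rfl
    | some entry => cases h : (PySem.Dict.mk entry).get? "title" <;> simp [h]

theorem pvB_fold (hm : List (String × List (String × String))) (parts : List (List Char)) (n : Nat) :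
    ∀ acc, (List.range n).foldl (fun acc i =>
      let pref := PySem.Chars.join ['.'] (parts.take (i + 1))
      if pref ≠ [] then
        match (PySem.Dict.mk hm).get? (String.ofList pref) with
        | some entry =>
          match (PySem.Dict.mk entry).get? "title" with
          | some t => acc ++ [t]
          | none => acc
        | none => acc
      else acc) acc = acc ++ pvF hm parts n := by
  induction n with
  | zero => intro acc; simp [pvF]
  | succ m ih =>
    intro acc
    rw [List.range_succ, List.foldl_append, ih acc]
    simp only [List.foldl_cons, List.foldl_nil, pvF]
    unfold pvOpt
    by_cases hp : PySem.Chars.join ['.'] (parts.take (m + 1)) = []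
    · simp [hp]
    · simp only [hp, ne_eq, not_false_eq_true, if_true, if_false]
      cases (PySem.Dict.mk hm).get? (String.ofList (PySem.Chars.join ['.'] (parts.take (m + 1)))) with
      | none => simp
      | some entry => cases h2 : (PySem.Dict.mk entry).get? "title" <;> simp [h2]

theorem pvA_loop (hm : List (String × List (String × String))) (parts : List (List Char))
    (hfree : ∀ p ∈ parts, '.' ∉ p) :
    ∀ n, 1 ≤ n → n ≤ parts.length → ∀ acc,
      pvLoopA hm (PySem.Chars.join ['.'] (parts.take n)) acc = acc ++ (pvF hm parts n).reverse := by
  intro n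
  induction n with
  | zero => omega
  | succ n ih =>
    intro _ hlen acc
    cases n with
    | zero =>
      -- base case: current = parts[0], which is dot-free so the loop stops after one step
      obtain ⟨p0, rest, rfl⟩ : ∃ p0 rest, parts = p0 :: rest := by
        cases parts with
        | nil => simp at hlen
        | cons a b => exact ⟨a, b, rfl⟩
      have h1 : (p0 :: rest).take 1 = [p0] := rfl
      rw [h1, pv_join_singleton']
      have hF : pvF hm (p0 :: rest) 1 = pvOpt hm p0 := by
        simp [pvF, h1]
      rw [hF, pvOpt_len]
      by_cases hp0 : p0 = []
      · subst hp0
        rw [pvLoopA]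
        simp [pvOpt]
      · have hdotfree : '.' ∉ p0 := hfree p0 (by simp)
        have hno : PySem.Chars.isIn ['.'] p0 = false := by
          cases h : PySem.Chars.isIn ['.'] p0 with
          | false => rfl
          | true => exact absurd (pv_mem_of_isIn p0 h) hdotfree
        rw [pvLoopA, if_neg hp0]
        simp only [hno, Bool.false_eq_true, dite_false]
        unfold pvOpt
        rw [if_neg hp0]
        cases hg : (PySem.Dict.mk hm).get? (String.ofList p0) with
        | none => simp
        | some entry => cases h2 : (PySem.Dict.mk entry).get? "title" <;> simp [h2]
    | succ m =>
      -- step: current = join(parts[:m+2]) contains '.', trims to join(parts[:m+1])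
      have hm1 : 1 ≤ m + 1 := by omega
      have hl : m + 1 ≤ parts.length := by omega
      have hq : parts[m + 1]? = some parts[m + 1] := List.getElem?_eq_getElem (by omega)
      have htake : parts.take (m + 2) = parts.take (m + 1) ++ [parts[m + 1]] := by
        rw [List.take_add_one, hq]; rfl
      have htn : parts.take (m + 1) ≠ [] := by
        have hlt : (parts.take (m + 1)).length = m + 1 := by
          rw [List.length_take]; omega
        intro hc
        rw [hc] at hlt
        simp at hlt
      have hcur : PySem.Chars.join ['.'] (parts.take (m + 2))
          = PySem.Chars.join ['.'] (parts.take (m + 1)) ++ '.' :: parts[m + 1] := by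
        rw [htake, pv_join_concat _ _ htn]
      have hne : PySem.Chars.join ['.'] (parts.take (m + 2)) ≠ [] := by
        rw [hcur]; simp
      have hdot : PySem.Chars.isIn ['.'] (PySem.Chars.join ['.'] (parts.take (m + 2))) = true := by
        apply pv_isIn_of_mem
        rw [hcur]
        exact List.mem_append_right _ (List.mem_cons_self ..)
      have htrim : pvTrimDot (PySem.Chars.join ['.'] (parts.take (m + 2)))
          = PySem.Chars.join ['.'] (parts.take (m + 1)) := by
        unfold pvTrimDot
        rw [pv_splitOn_eq]
        cases htk : parts.take (m + 2) with
        | nil =>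
          exfalso
          have hlt : (parts.take (m + 2)).length = m + 2 := by
            rw [List.length_take]; omega
          rw [htk] at hlt
          simp at hlt
        | cons q0 qs =>
          have hsub : ∀ p ∈ q0 :: qs, '.' ∉ p := by
            intro p hp
            exact hfree p (List.take_subset _ _ (htk ▸ hp))
          rw [pv_recover qs q0 [] (hsub q0 (by simp)) (fun p hp => hsub p (by simp [hp]))]
          have : (q0 :: qs).dropLast = parts.take (m + 1) := by
            rw [← htk, htake, List.dropLast_concat]
          rw [List.nil_append, this]
      rw [pvLoopA, if_neg hne]
      simp only [hdot, dite_true]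
      rw [htrim]
      have hopt : ∀ (a : List String),
          (match (PySem.Dict.mk hm).get? (String.ofList (PySem.Chars.join ['.'] (parts.take (m + 2)))) with
            | some entry =>
              match (PySem.Dict.mk entry).get? "title" with
              | some t => a ++ [t]
              | none => a
            | none => a)
          = a ++ pvOpt hm (PySem.Chars.join ['.'] (parts.take (m + 2))) := by
        intro a
        unfold pvOpt
        rw [if_neg hne]
        cases hg : (PySem.Dict.mk hm).get? (String.ofList (PySem.Chars.join ['.'] (parts.take (m + 2)))) with
        | none => simp
        | some entry => cases h2 : (PySem.Dict.mk entry).get? "title" <;> simp [h2]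
      rw [ih hm1 hl _]
      rw [hopt acc]
      show _ = acc ++ (pvF hm parts (m + 2)).reverse
      rw [show pvF hm parts (m + 2)
            = pvF hm parts (m + 1) ++ pvOpt hm (PySem.Chars.join ['.'] (parts.take (m + 2))) from rfl]
      rw [List.reverse_append, pvOpt_len, List.append_assoc]

theorem pv_main (code : String) (hm : List (String × List (String × String))) :
    get_full_hierarchy_path code hm = get_full_hierarchy_path_alt code hm := by
  by_cases hc : code = ""
  · simp [get_full_hierarchy_path, get_full_hierarchy_path_alt, hc]
  · simp only [get_full_hierarchy_path, get_full_hierarchy_path_alt, if_neg hc]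
    have hp : PySem.Chars.splitOn code.toList ['.'] = pvSplitDot [] code.toList :=
      pv_splitOn_eq code.toList
    have hfree : ∀ p ∈ PySem.Chars.splitOn code.toList ['.'], '.' ∉ p := by
      rw [hp]; exact pv_no_dot_mem code.toList [] (by simp)
    have hlen : 1 ≤ (PySem.Chars.splitOn code.toList ['.']).length := by
      rw [hp]
      exact List.length_pos_of_ne_nil (pvSplitDot_ne_nil _ _)
    have hjoin : PySem.Chars.join ['.']
        ((PySem.Chars.splitOn code.toList ['.']).take (PySem.Chars.splitOn code.toList ['.']).length)
        = code.toList := by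
      rw [List.take_length, hp, pv_join_pvSplitDot]
      simp
    rw [pvB_fold]
    conv_lhs => rw [← hjoin]
    rw [pvA_loop hm _ hfree _ hlen le_rfl []]
    simp

-- ===== VERDICT (by name: the statement is the Claim_ definition above) =====
theorem get_full_hierarchy_path_spec : Claim_equal_get_full_hierarchy_path := by
  intro code hm _ _
  unfold Spec_get_full_hierarchy_path
  exact pv_main code hm
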